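-- pv_equiv track=rewrite | github.com/alexandraback/datacollection | solutions_5636311922769920_0/Python/alxhwg/fractiles.py | fractile
-- ===== SOURCE A (Python) =====
-- def fractile(K, C, S):
--     # K is the branching factor, C is the depth of our tree, S is the number of leaves we can see
--     if K > C*S:
--         return None
--     # The leaf nodes we need to check can be determined by the path we choose which can be constructed from a K-nary string.
--     seen = 0
--     paths = []
--     digit = 0 # branch number from 0 to K-1
--     while seen < K:
--         path = 0 # leaf number from 1 to K**C
--         power = C - 1 # power of K, C-1 to 0
--         while power >= 0:
--             path += (K**power)*digit
--             if digit < K - 1: # If we have not exhausted all branches, change branches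
--                 digit += 1
--             power -= 1
--             seen += 1
--         paths.append(path+1)
--     return paths
-- ===== SOURCE B (Python) =====
-- def fractile(K, C, S):
--     if K > C*S:
--         return None
--     if K <= 0:
--         return []
--     N = -(-K // C)           # number of paths = ceil(K/C); C > 0 here (else the guard fired)
--     m = K - (N - 1) * C      # uncapped digit positions in the last path, 1 <= m <= C
--     L = C - m                # trailing digits of the last path that are capped at K-1
--     R = T = RL = TL = 0
--     for t in range(C):
--         if t == L:
--             RL, TL = R, T    # prefix values of length L
--         R = R * K + 1        # repunit 11..1 of length t+1 in base K
--         T = T * K + t        # value of the digit string 0,1,...,t in base K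
--     step = C * R
--     paths = [T + 1 + j * step for j in range(N - 1)]
--     paths.append((N - 1) * step + T - (RL + TL) + 1)
--     return paths
-- ===== Notes on version B (the rewrite author's own statement) =====
-- stated objective: faster
-- what changed: Instead of building each path digit by digit, B derives a closed form: one O(C) pass computes the base-K repunit R, the digit-string value T and their length-L prefixes, then all full paths are emitted as the arithmetic progression T+1+j*(C*R) and only the last path gets a closed-form correction for its capped digits.
import Mathlib
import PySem

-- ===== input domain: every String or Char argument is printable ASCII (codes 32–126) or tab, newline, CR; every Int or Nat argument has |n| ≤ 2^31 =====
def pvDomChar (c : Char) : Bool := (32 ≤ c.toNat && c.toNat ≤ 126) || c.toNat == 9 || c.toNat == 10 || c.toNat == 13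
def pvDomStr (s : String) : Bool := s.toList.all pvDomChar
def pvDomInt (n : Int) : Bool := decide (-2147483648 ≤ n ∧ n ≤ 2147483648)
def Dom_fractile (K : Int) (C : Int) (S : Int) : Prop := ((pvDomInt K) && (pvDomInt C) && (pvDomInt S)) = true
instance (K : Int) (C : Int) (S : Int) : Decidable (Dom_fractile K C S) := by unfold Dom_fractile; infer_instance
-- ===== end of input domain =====

-- B replaces A's per-path digit loop by closed forms: all full paths form an arithmetic
-- progression T + 1 + j*(C*R) (R = base-K repunit of length C, T = value of digits 0..C-1),
-- and only the last path gets a closed-form correction for its capped digits; objective: faster (measured).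

-- ===== PORT A =====
-- inner while loop: state (path, power, digit, seen); fuel = number of remaining iterations
-- (the loop runs exactly C iterations, power = C-1 .. 0; fuel C.toNat suffices)
def fractileInner (K : Int) : Nat → Int → Int → Int → Int → (Int × Int × Int)
  | 0, path, _, digit, seen => (path, digit, seen)
  | Nat.succ f, path, power, digit, seen =>
    if power ≥ 0 then
      let path' := path + K ^ power.toNat * digit
      let digit' := if digit < K - 1 then digit + 1 else digit
      fractileInner K f path' (power - 1) digit' (seen + 1)
    else
      (path, digit, seen)

-- outer while loop: state (seen, paths, digit); under Pre_ at most K.toNat iterations run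
def fractileOuter (K : Int) (C : Int) : Nat → Int → List Int → Int → List Int
  | 0, _, paths, _ => paths
  | Nat.succ f, seen, paths, digit =>
    if seen < K then
      let r := fractileInner K C.toNat 0 (C - 1) digit seen
      fractileOuter K C f r.2.2 (paths ++ [r.1 + 1]) r.2.1
    else
      paths

def fractile (K : Int) (C : Int) (S : Int) : Option (List Int) :=
  if K > C * S then none
  else some (fractileOuter K C K.toNat 0 [] 0)

-- ===== PORT B =====
-- one iteration of Source B's loop on state (R, T, RL, TL): capture (RL,TL) when t == L, then update R, T
def bStep (K : Int) (L : Int) (st : Int × Int × Int × Int) (t : Int) : Int × Int × Int × Int :=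
  let st := if t == L then (st.1, st.2.1, st.1, st.2.1) else st
  (st.1 * K + 1, st.2.1 * K + t, st.2.2.1, st.2.2.2)

def fractile_alt (K : Int) (C : Int) (S : Int) : Option (List Int) :=
  if K > C * S then none
  else if K ≤ 0 then some []
  else
    let N := -(PySem.Int.floordiv (-K) C)
    let m := K - (N - 1) * C
    let L := C - m
    let st := (PySem.List.pyRange 0 C 1).foldl (bStep K L) (0, 0, 0, 0)
    let step := C * st.1
    some (((PySem.List.pyRange 0 (N - 1) 1).map (fun j => st.2.1 + 1 + j * step)) ++
      [(N - 1) * step + st.2.1 - (st.2.2.1 + st.2.2.2) + 1])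

-- ===== PRECONDITION & SPEC =====
-- Pre_ excludes exactly the inputs (K > 0, C ≤ 0, K ≤ C*S) on which A's outer while loop
-- never increments `seen` and A DIVERGES (returns nothing); B raises ZeroDivisionError (C = 0)
-- or returns there.
def Pre_fractile (K : Int) (C : Int) (S : Int) : Prop := ¬ (0 < K ∧ C ≤ 0 ∧ K ≤ C * S)
instance (K : Int) (C : Int) (S : Int) : Decidable (Pre_fractile K C S) := by unfold Pre_fractile; infer_instance
def pvWitness_fractile : Int × Int × Int := (3, 2, 2)

def Spec_fractile (K : Int) (C : Int) (S : Int) (out : Option (List Int)) : Prop := out = fractile_alt K C S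
instance (K : Int) (C : Int) (S : Int) (out : Option (List Int)) : Decidable (Spec_fractile K C S out) := by unfold Spec_fractile; infer_instance

-- ===== CLAIM (what is proved, stated in full; the proofs are below) =====
def Claim_equal_fractile : Prop := ∀ (K : Int) (C : Int) (S : Int), Dom_fractile K C S → Pre_fractile K C S → Spec_fractile K C S (fractile K C S)

-- ===== LEMMAS AND PROOFS =====

-- head-recursive digit sum: digitSum K n s = Σ_{t<n} K^(n-1-t) * min(s+t, K-1)
def digitSum (K : Int) : Nat → Int → Int
  | 0, _ => 0
  | Nat.succ n, s => K ^ n * min s (K - 1) + digitSum K n (s + 1)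

-- repunit Rf K n = Σ_{i<n} K^i and Tf K n = value of digit string 0,1,…,n-1 in base K
def Rf (K : Int) : Nat → Int
  | 0 => 0
  | Nat.succ n => K ^ n + Rf K n

def Tf (K : Int) : Nat → Int
  | 0 => 0
  | Nat.succ n => Tf K n + Rf K n

theorem Rf_snoc (K : Int) : ∀ n : Nat, Rf K (n + 1) = Rf K n * K + 1 := by
  intro n
  induction n with
  | zero => simp [Rf]
  | succ n ih =>
    show K ^ (n + 1) + Rf K (n + 1) = (K ^ n + Rf K n) * K + 1
    rw [ih]; ring

theorem Tf_snoc (K : Int) : ∀ n : Nat, Tf K (n + 1) = Tf K n * K + n := by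
  intro n
  induction n with
  | zero => simp [Tf, Rf]
  | succ n ih =>
    show Tf K (n + 1) + Rf K (n + 1) = (Tf K n + Rf K n) * K + ((n : Int) + 1)
    rw [ih, Rf_snoc]; ring

theorem Rf_add (K : Int) (b : Nat) : ∀ a : Nat, Rf K (a + b) = K ^ b * Rf K a + Rf K b := by
  intro a
  induction a with
  | zero => simp [Rf]
  | succ a ih =>
    have h : a + 1 + b = (a + b) + 1 := by omega
    rw [h]
    show K ^ (a + b) + Rf K (a + b) = K ^ b * (K ^ a + Rf K a) + Rf K b
    rw [ih, pow_add]; ring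

theorem Tf_add (K : Int) (b : Nat) : ∀ a : Nat,
    Tf K (a + b) = K ^ b * Tf K a + (a : Int) * Rf K b + Tf K b := by
  intro a
  induction a with
  | zero => simp [Tf]
  | succ a ih =>
    have h : a + 1 + b = (a + b) + 1 := by omega
    rw [h]
    show Tf K (a + b) + Rf K (a + b) = K ^ b * (Tf K a + Rf K a) + ((a : Int) + 1) * Rf K b + Tf K b
    rw [ih, Rf_add]; ring

-- uncapped block: all digits s..s+n-1 stay below K, value is linear in s
theorem digitSum_linear (K : Int) : ∀ (n : Nat) (s : Int), s + n ≤ K →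
    digitSum K n s = s * Rf K n + Tf K n := by
  intro n
  induction n with
  | zero => intro s _; simp [digitSum, Rf, Tf]
  | succ n ih =>
    intro s hs
    have hmin : min s (K - 1) = s := min_eq_left (by push_cast at hs; omega)
    show K ^ n * min s (K - 1) + digitSum K n (s + 1) = s * Rf K (n + 1) + Tf K (n + 1)
    rw [hmin, ih (s + 1) (by push_cast at hs ⊢; omega)]
    show K ^ n * s + ((s + 1) * Rf K n + Tf K n) = s * (K ^ n + Rf K n) + (Tf K n + Rf K n)
    ring

-- fully capped block: every digit is K-1
theorem digitSum_capped (K : Int) : ∀ (n : Nat) (s : Int), K ≤ s →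
    digitSum K n s = (K - 1) * Rf K n := by
  intro n
  induction n with
  | zero => intro s _; simp [digitSum, Rf]
  | succ n ih =>
    intro s hs
    have hmin : min s (K - 1) = K - 1 := min_eq_right (by omega)
    show K ^ n * min s (K - 1) + digitSum K n (s + 1) = (K - 1) * Rf K (n + 1)
    rw [hmin, ih (s + 1) (by omega)]
    show K ^ n * (K - 1) + (K - 1) * Rf K n = (K - 1) * (K ^ n + Rf K n)
    ring

-- split a digit block of length a+b at position a
theorem digitSum_split (K : Int) (b : Nat) : ∀ (a : Nat) (s : Int),
    digitSum K (a + b) s = K ^ b * digitSum K a s + digitSum K b (s + a) := by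
  intro a
  induction a with
  | zero => intro s; simp [digitSum]
  | succ a ih =>
    intro s
    have h1 : a + 1 + b = (a + b) + 1 := by omega
    rw [h1]
    show K ^ (a + b) * min s (K - 1) + digitSum K (a + b) (s + 1)
        = K ^ b * (K ^ a * min s (K - 1) + digitSum K a (s + 1)) + digitSum K b (s + (a + 1 : Nat))
    rw [ih (s + 1)]
    have h2 : s + 1 + (a : Int) = s + ((a : Nat) + 1 : Nat) := by push_cast; ring
    rw [h2, pow_add]; ring

-- the inner while loop, started with fuel n and power n-1 and digit = min(seen, K-1),
-- runs n full iterations and computes digitSum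
theorem fractileInner_eq (K : Int) (n : Nat) : ∀ (path s : Int),
    fractileInner K n path ((n : Int) - 1) (min s (K - 1)) s
      = (path + digitSum K n s, min (s + n) (K - 1), s + n) := by
  induction n with
  | zero => intro path s; simp [fractileInner, digitSum]
  | succ n ih =>
    intro path s
    have hpow : ((n : Int)).toNat = n := by simp
    have hdig : (if min s (K - 1) < K - 1 then min s (K - 1) + 1 else min s (K - 1))
        = min (s + 1) (K - 1) := by
      rcases (by omega : K - 1 ≤ s ∨ s < K - 1) with h | h
      · simp [min_eq_right h, min_eq_right (by omega : K - 1 ≤ s + 1)]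
      · simp [min_eq_left (le_of_lt h), min_eq_left (by omega : s + 1 ≤ K - 1), h]
    show (if ((n : Int) + 1 - 1 ≥ 0) then _ else _) = _
    rw [if_pos (by omega)]
    have e1 : (((n + 1 : Nat) : Int) - 1) = (n : Int) := by push_cast; ring
    rw [e1, hpow, hdig]
    rw [ih (path + K ^ n * min s (K - 1)) (s + 1)]
    have hd : digitSum K (n + 1) s = K ^ n * min s (K - 1) + digitSum K n (s + 1) := rfl
    rw [hd]
    push_cast
    have e2 : s + 1 + (n : Int) = s + ((n : Int) + 1) := by ring
    rw [e2]
    simp only [Prod.mk.injEq]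
    exact ⟨by ring, trivial⟩

-- characterization of the outer loop for K > 0, C > 0:
-- starting at outer index j (seen = j*C, digit = min(j*C, K-1)) with enough fuel,
-- it appends digitSum K C (i*C) + 1 for each remaining index i = j, …, N-1 (N = ceil(K/C))
theorem fractileOuter_eq (K C : Int) (_hK : 0 < K) (hC : 0 < C) (N : Int)
    (hN1 : K ≤ N * C) (hN2 : (N - 1) * C < K) (fuel : Nat) :
    ∀ (j : Int) (acc : List Int), 0 ≤ j → N ≤ j + fuel →
    fractileOuter K C fuel (j * C) acc (min (j * C) (K - 1))
      = acc ++ (PySem.List.pyRange j N 1).map (fun i => digitSum K C.toNat (i * C) + 1) := by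
  induction fuel with
  | zero =>
    intro j acc hj hfuel
    have hjN : N ≤ j := by simpa using hfuel
    simp [fractileOuter, PySem.List.pyRange_one_eq_nil hjN]
  | succ fuel ih =>
    intro j acc hj hfuel
    show (if j * C < K then _ else _) = _
    by_cases hlt : j * C < K
    · rw [if_pos hlt]
      have hjN : j < N := by nlinarith
      have hCt : ((C.toNat : Int)) = C := by omega
      have hpow : (C - 1) = ((C.toNat : Int)) - 1 := by omega
      rw [hpow, fractileInner_eq K C.toNat 0 (j * C)]
      have hseen : j * C + (C.toNat : Int) = (j + 1) * C := by rw [hCt]; ring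
      simp only [hseen, zero_add]
      rw [ih (j + 1) (acc ++ [digitSum K C.toNat (j * C) + 1]) (by omega) (by push_cast at hfuel ⊢; omega)]
      rw [PySem.List.pyRange_one_cons hjN]
      simp
    · rw [if_neg hlt]
      have hjN : N ≤ j := by nlinarith
      simp [PySem.List.pyRange_one_eq_nil hjN]

-- B's fold over range(n) computes (Rf n, Tf n) and captures (Rf L, Tf L) once t passes L
theorem fold_eq (K : Int) (L : Nat) : ∀ n : Nat,
    (PySem.List.pyRange 0 (n : Int) 1).foldl (bStep K (L : Int)) (0, 0, 0, 0)
      = (Rf K n, Tf K n, if L < n then Rf K L else 0, if L < n then Tf K L else 0) := by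
  intro n
  induction n with
  | zero => simp [PySem.List.pyRange_one_eq_nil, Rf, Tf]
  | succ n ih =>
    have hsplit : PySem.List.pyRange 0 ((n : Nat) + 1 : Int) 1
        = PySem.List.pyRange 0 (n : Int) 1 ++ [(n : Int)] := by
      exact PySem.List.pyRange_one_succ_right (by positivity)
    push_cast
    rw [hsplit, List.foldl_append, ih]
    simp only [List.foldl, bStep]
    by_cases hnL : n = L
    · subst hnL
      simp [Rf_snoc, Tf_snoc]
    · have hbeq : ((n : Int) == (L : Int)) = false := by simp [hnL]
      have hiff : L < n + 1 ↔ L < n := by omega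
      simp [hbeq, Rf_snoc, Tf_snoc, hiff]

-- the same with Int bounds, as the port uses them
theorem fold_eq' (K C L : Int) (hL0 : 0 ≤ L) (hLC : L < C) :
    (PySem.List.pyRange 0 C 1).foldl (bStep K L) (0, 0, 0, 0)
      = (Rf K C.toNat, Tf K C.toNat, Rf K L.toNat, Tf K L.toNat) := by
  have hC : ((C.toNat : Int)) = C := by omega
  have hL : ((L.toNat : Int)) = L := by omega
  conv_lhs => rw [← hC, ← hL]
  rw [fold_eq K L.toNat C.toNat]
  simp [show L.toNat < C.toNat by omega]

-- evaluation of fractile_alt in the main case, in terms of Rf/Tf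
theorem alt_eq (K C S N L : Int) (hg : ¬ K > C * S) (hK : ¬ K ≤ 0)
    (hNdef : N = -(PySem.Int.floordiv (-K) C))
    (hLdef : L = C - (K - (N - 1) * C))
    (hL0 : 0 ≤ L) (hLC : L < C) :
    fractile_alt K C S = some (((PySem.List.pyRange 0 (N - 1) 1).map
        (fun j => Tf K C.toNat + 1 + j * (C * Rf K C.toNat))) ++
      [(N - 1) * (C * Rf K C.toNat) + Tf K C.toNat - (Rf K L.toNat + Tf K L.toNat) + 1]) := by
  unfold fractile_alt
  rw [if_neg hg, if_neg hK]
  show some (((PySem.List.pyRange 0 (-(PySem.Int.floordiv (-K) C) - 1) 1).map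
      (fun j => ((PySem.List.pyRange 0 C 1).foldl (bStep K (C - (K - (-(PySem.Int.floordiv (-K) C) - 1) * C))) (0, 0, 0, 0)).2.1 + 1
        + j * (C * ((PySem.List.pyRange 0 C 1).foldl (bStep K (C - (K - (-(PySem.Int.floordiv (-K) C) - 1) * C))) (0, 0, 0, 0)).1)))
    ++ [(-(PySem.Int.floordiv (-K) C) - 1) * (C * ((PySem.List.pyRange 0 C 1).foldl (bStep K (C - (K - (-(PySem.Int.floordiv (-K) C) - 1) * C))) (0, 0, 0, 0)).1)
        + ((PySem.List.pyRange 0 C 1).foldl (bStep K (C - (K - (-(PySem.Int.floordiv (-K) C) - 1) * C))) (0, 0, 0, 0)).2.1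
        - (((PySem.List.pyRange 0 C 1).foldl (bStep K (C - (K - (-(PySem.Int.floordiv (-K) C) - 1) * C))) (0, 0, 0, 0)).2.2.1
          + ((PySem.List.pyRange 0 C 1).foldl (bStep K (C - (K - (-(PySem.Int.floordiv (-K) C) - 1) * C))) (0, 0, 0, 0)).2.2.2) + 1]) = _
  rw [← hNdef, ← hLdef, fold_eq' K C L hL0 hLC]

-- ceiling-division bracket for N = -((-K) // C), C > 0
theorem ceilBracket (K C : Int) (hC : 0 < C) :
    K ≤ (-(PySem.Int.floordiv (-K) C)) * C ∧ ((-(PySem.Int.floordiv (-K) C)) - 1) * C < K := by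
  have h := (PySem.Int.neg_floordiv_neg_eq_iff_of_pos (a := K) (b := C)
      (q := -(PySem.Int.floordiv (-K) C)) hC).mp rfl
  constructor
  · exact h.2
  · nlinarith [h.1]

-- ===== VERDICT (by name: the statement is the Claim_ definition above) =====
theorem fractile_spec : Claim_equal_fractile := by
  intro K C S _hDom hPre
  unfold Spec_fractile fractile
  by_cases hguard : K > C * S
  · unfold fractile_alt
    simp [hguard]
  · rw [if_neg hguard]
    by_cases hK : K ≤ 0
    · have h0 : K.toNat = 0 := by omega
      unfold fractile_alt
      rw [if_neg hguard, if_pos hK, h0]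
      rfl
    · have hK' : 0 < K := by omega
      have hC : 0 < C := by
        by_contra h
        exact hPre ⟨hK', by omega, not_lt.mp hguard⟩
      set N := -(PySem.Int.floordiv (-K) C) with hNdef
      obtain ⟨hN1, hN2⟩ := ceilBracket K C hC
      rw [← hNdef] at hN1 hN2
      have hNK : N ≤ K := by
        rcases le_or_gt N 0 with h | h
        · omega
        · have h1 : N - 1 ≤ (N - 1) * C := le_mul_of_one_le_right (by omega) (by omega)
          linarith
      have hN0 : 1 ≤ N := by nlinarith
      set m := K - (N - 1) * C with hmdef
      have hm1 : 1 ≤ m := by omega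
      have hmC : m ≤ C := by nlinarith
      set L := C - m with hLdef
      have hL0 : 0 ≤ L := by omega
      have hLC : L < C := by omega
      rw [alt_eq K C S N L hguard hK hNdef (by omega) hL0 hLC]
      -- A's side: the outer loop produces the map of digitSum over range(N)
      have hdig0 : (0 : Int) = min ((0 : Int) * C) (K - 1) := by
        simp [min_eq_left (by omega : (0:Int) ≤ K - 1)]
      have hA := fractileOuter_eq K C hK' hC N hN1 hN2 K.toNat 0 [] le_rfl (by omega)
      simp only [zero_mul] at hA hdig0
      rw [← hdig0] at hA
      rw [hA, List.nil_append]
      have hCcast : ((C.toNat : Int)) = C := by omega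
      have hNsplit : PySem.List.pyRange 0 N 1
          = PySem.List.pyRange 0 (N - 1) 1 ++ [N - 1] := by
        have := PySem.List.pyRange_one_succ_right (a := 0) (b := N - 1) (by omega)
        simpa using this
      rw [hNsplit, List.map_append, List.map_cons, List.map_nil]
      congr 1
      congr 1
      · -- full blocks: digitSum is linear
        apply List.map_congr_left
        intro j hj
        rw [PySem.List.mem_pyRange_one] at hj
        have hmul : (j + 1) * C ≤ (N - 1) * C :=
          mul_le_mul_of_nonneg_right (by omega) (le_of_lt hC)
        have hjC : j * C + (C.toNat : Int) ≤ K := by rw [hCcast]; nlinarith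
        rw [digitSum_linear K C.toNat (j * C) hjC]
        ring
      · -- last block: split at m uncapped digits, then all capped
        have hmn : m.toNat + L.toNat = C.toNat := by omega
        have hmcast : ((m.toNat : Int)) = m := by omega
        have hLcast : ((L.toNat : Int)) = L := by omega
        rw [← hmn, digitSum_split]
        rw [digitSum_linear K m.toNat ((N - 1) * C) (by rw [hmcast]; omega)]
        rw [digitSum_capped K L.toNat ((N - 1) * C + (m.toNat : Int)) (by rw [hmcast]; omega)]
        rw [Rf_add K L.toNat m.toNat, Tf_add K L.toNat m.toNat, hmcast]
        have heq : (N - 1) * C = K - m := by omega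
        simp only [List.cons.injEq, and_true]
        linear_combination (-(Rf K L.toNat)) * heq
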